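-- pv_equiv track=rewrite | github.com/ukint-vs/auto-researchtrading | prepare.py | _select_training_subset
-- ===== SOURCE A (Python) =====
-- TRAINING_SIZE = 10
--
-- CAP_TIERS = {
--     "BTC": 1, "ETH": 1,
--     "SOL": 2, "XRP": 2, "DOGE": 2, "ADA": 2, "AVAX": 2, "LINK": 2,
--     "BNB": 2, "TRX": 2, "DOT": 2, "MATIC": 2, "POL": 2, "SHIB": 2,
--     "LTC": 2, "UNI": 2, "BCH": 2, "NEAR": 2, "APT": 2, "FIL": 2,
--     "ICP": 2, "ATOM": 2, "ARB": 2, "OP": 2, "SUI": 2, "SEI": 2,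
-- }
--
-- TRAINING_TIER_MIN = {1: 2, 2: 3}  # min coins per tier in training set
--
-- def _select_training_subset(pipeline):
--     """Select TRAINING_SIZE coins from pipeline ensuring tier diversity."""
--     selected = []
--     remaining = list(pipeline)
--
--     # Ensure BTC and ETH are always included (tier 1 anchors)
--     for sym in ["BTC", "ETH"]:
--         if sym in remaining:
--             selected.append(sym)
--             remaining.remove(sym)
--
--     # Fill tier minimums
--     for tier, min_count in sorted(TRAINING_TIER_MIN.items()):
--         current = sum(1 for s in selected if CAP_TIERS.get(s, 3) == tier)
--         for sym in list(remaining):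
--             if current >= min_count:
--                 break
--             if CAP_TIERS.get(sym, 3) == tier:
--                 selected.append(sym)
--                 remaining.remove(sym)
--                 current += 1
--
--     # Fill rest by rank order
--     for sym in remaining:
--         if len(selected) >= TRAINING_SIZE:
--             break
--         selected.append(sym)
--
--     return selected[:TRAINING_SIZE]
-- ===== SOURCE B (Python) =====
-- TRAINING_SIZE = 10
--
-- CAP_TIERS = {
--     "BTC": 1, "ETH": 1,
--     "SOL": 2, "XRP": 2, "DOGE": 2, "ADA": 2, "AVAX": 2, "LINK": 2,
--     "BNB": 2, "TRX": 2, "DOT": 2, "MATIC": 2, "POL": 2, "SHIB": 2,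
--     "LTC": 2, "UNI": 2, "BCH": 2, "NEAR": 2, "APT": 2, "FIL": 2,
--     "ICP": 2, "ATOM": 2, "ARB": 2, "OP": 2, "SUI": 2, "SEI": 2,
-- }
--
-- TRAINING_TIER_MIN = {1: 2, 2: 3}
--
--
-- def _split_first(pred, k, xs):
--     """Split xs into (the first k elements satisfying pred, everything else in order)."""
--     picked, rest = [], []
--     for x in xs:
--         if k > 0 and pred(x):
--             picked.append(x)
--             k -= 1
--         else:
--             rest.append(x)
--     return picked, rest
--
--
-- def _select_training_subset(pipeline):
--     """Select TRAINING_SIZE coins from pipeline ensuring tier diversity."""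
--     tier = lambda s: CAP_TIERS.get(s, 3)
--     btc, r = _split_first(lambda s: s == "BTC", 1, pipeline)
--     eth, r = _split_first(lambda s: s == "ETH", 1, r)
--     anchors = btc + eth
--     t1, r = _split_first(lambda s: tier(s) == 1, TRAINING_TIER_MIN[1] - len(anchors), r)
--     t2, r = _split_first(lambda s: tier(s) == 2, TRAINING_TIER_MIN[2], r)
--     selected = anchors + t1 + t2
--     return (selected + r[: TRAINING_SIZE - len(selected)])[:TRAINING_SIZE]
-- ===== Notes on version B (the rewrite author's own statement) =====
-- stated objective: simpler
-- what changed: A mutates a shared `remaining` list (membership test + list.remove, per-tier recount of `selected`, snapshot loop with break); B is rewritten as three chained passes of one pure helper `_split_first(pred, k, xs)` that splits off the first k matching elements, with the tier quotas computed arithmetically.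
import Mathlib
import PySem

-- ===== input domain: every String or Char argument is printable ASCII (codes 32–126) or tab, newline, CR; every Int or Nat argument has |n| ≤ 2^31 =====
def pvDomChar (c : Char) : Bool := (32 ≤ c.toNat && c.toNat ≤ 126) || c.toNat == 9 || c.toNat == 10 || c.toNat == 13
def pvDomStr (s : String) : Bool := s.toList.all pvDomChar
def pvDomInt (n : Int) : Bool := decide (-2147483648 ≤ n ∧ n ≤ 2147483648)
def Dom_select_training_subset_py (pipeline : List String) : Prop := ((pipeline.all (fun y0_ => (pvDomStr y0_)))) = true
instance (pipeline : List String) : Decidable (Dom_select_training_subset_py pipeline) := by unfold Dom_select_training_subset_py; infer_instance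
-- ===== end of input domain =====

-- B replaces A's mutate-and-recount selection (membership test + list.remove + per-tier recount
-- of `selected` + snapshot loop with break) by three uses of one pure splitting helper; equal
-- return value proved on all inputs (A is total). Objective: simpler.

-- shared module constants
def TRAINING_SIZE : Int := 10

def CAP_TIERS : PySem.Dict String Int :=
  PySem.Dict.ofList [("BTC", 1), ("ETH", 1),
   ("SOL", 2), ("XRP", 2), ("DOGE", 2), ("ADA", 2), ("AVAX", 2), ("LINK", 2),
   ("BNB", 2), ("TRX", 2), ("DOT", 2), ("MATIC", 2), ("POL", 2), ("SHIB", 2),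
   ("LTC", 2), ("UNI", 2), ("BCH", 2), ("NEAR", 2), ("APT", 2), ("FIL", 2),
   ("ICP", 2), ("ATOM", 2), ("ARB", 2), ("OP", 2), ("SUI", 2), ("SEI", 2)]

-- TRAINING_TIER_MIN = {1: 2, 2: 3}
def TRAINING_TIER_MIN : PySem.Dict Int Int := PySem.Dict.ofList [(1, 2), (2, 3)]

-- CAP_TIERS.get(s, 3)
def tierOf (s : String) : Int := PySem.Dict.getD CAP_TIERS s 3

-- ===== PORT A =====

-- `for sym in ["BTC","ETH"]: if sym in remaining: selected.append(sym); remaining.remove(sym)`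
-- (remove of an element checked present, so `remove?` is some and `getD` is unreachable)
def anchorStepA (st : List String × List String) (sym : String) : List String × List String :=
  if st.2.contains sym then (st.1 ++ [sym], (PySem.List.remove? st.2 sym).getD st.2)
  else st

-- `current = sum(1 for s in selected if CAP_TIERS.get(s, 3) == tier)`
def countTierA (sel : List String) (t : Int) : Int :=
  sel.foldl (fun acc s => if tierOf s == t then acc + 1 else acc) 0

-- `for sym in list(remaining): if current >= min_count: break; …` — break = early return;
-- `remaining.remove(sym)` cannot raise (sym comes from a snapshot of remaining): getD unreachable
def tierFillA (t minc : Int) : List String → List String → List String → Int →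
    List String × List String
  | [], sel, rem, _ => (sel, rem)
  | sym :: snap, sel, rem, cur =>
    if cur ≥ minc then (sel, rem)
    else if tierOf sym == t then
      tierFillA t minc snap (sel ++ [sym]) ((PySem.List.remove? rem sym).getD rem) (cur + 1)
    else tierFillA t minc snap sel rem cur

-- `for sym in remaining: if len(selected) >= TRAINING_SIZE: break; selected.append(sym)`
def restFillA : List String → List String → List String
  | [], sel => sel
  | sym :: rem, sel =>
    if (sel.length : Int) ≥ TRAINING_SIZE then sel else restFillA rem (sel ++ [sym])

def select_training_subset_py (pipeline : List String) : List String :=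
  let st := ["BTC", "ETH"].foldl anchorStepA (([] : List String), pipeline)
  -- `for tier, min_count in sorted(TRAINING_TIER_MIN.items())`
  let st := (PySem.List.sorted TRAINING_TIER_MIN.items (fun p => p.1) false).foldl
    (fun (st : List String × List String) tm =>
      tierFillA tm.1 tm.2 st.2 st.1 st.2 (countTierA st.1 tm.1)) st
  PySem.List.slice (restFillA st.2 st.1) none (some TRAINING_SIZE)

-- ===== PORT B =====

-- `_split_first(pred, k, xs)`: one loop appending to picked/rest, counting k down
def splitFirst (p : String → Bool) (k : Int) (xs : List String) :
    List String × List String :=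
  let st := xs.foldl (fun (st : List String × List String × Int) x =>
      if 0 < st.2.2 ∧ p x = true then (st.1 ++ [x], st.2.1, st.2.2 - 1)
      else (st.1, st.2.1 ++ [x], st.2.2)) ([], [], k)
  (st.1, st.2.1)

-- TRAINING_TIER_MIN[tier] (both keys present, so KeyError unreachable: getD)
def select_training_subset_py_alt (pipeline : List String) : List String :=
  let br := splitFirst (fun s => s == "BTC") 1 pipeline
  let er := splitFirst (fun s => s == "ETH") 1 br.2
  let anchors := br.1 ++ er.1
  let t1r := splitFirst (fun s => tierOf s == 1)
    (PySem.Dict.getD TRAINING_TIER_MIN 1 0 - (anchors.length : Int)) er.2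
  let t2r := splitFirst (fun s => tierOf s == 2) (PySem.Dict.getD TRAINING_TIER_MIN 2 0) t1r.2
  let selected := anchors ++ t1r.1 ++ t2r.1
  PySem.List.slice
    (selected ++ PySem.List.slice t2r.2 none (some (TRAINING_SIZE - (selected.length : Int))))
    none (some TRAINING_SIZE)

-- ===== PRECONDITION & SPEC =====
def Spec_select_training_subset_py (pipeline : List String) (out : List String) : Prop := out = select_training_subset_py_alt pipeline
instance (pipeline : List String) (out : List String) : Decidable (Spec_select_training_subset_py pipeline out) := by unfold Spec_select_training_subset_py; infer_instance

-- ===== CLAIM (what is proved, stated in full; the proofs are below) =====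
def Claim_equal_select_training_subset_py : Prop := ∀ (pipeline : List String), Dom_select_training_subset_py pipeline → Spec_select_training_subset_py pipeline (select_training_subset_py pipeline)

-- ===== LEMMAS AND PROOFS =====

-- recursive characterisation of splitFirst (proof device)
def splitRec (p : String → Bool) : Int → List String → List String × List String
  | _, [] => ([], [])
  | k, x :: xs =>
    if 0 < k ∧ p x = true then
      let r := splitRec p (k - 1) xs; (x :: r.1, r.2)
    else
      let r := splitRec p k xs; (r.1, x :: r.2)

theorem splitFirst_fold_aux (p : String → Bool) (xs : List String) :
    ∀ (a b : List String) (k : Int),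
    xs.foldl (fun (st : List String × List String × Int) x =>
      if 0 < st.2.2 ∧ p x = true then (st.1 ++ [x], st.2.1, st.2.2 - 1)
      else (st.1, st.2.1 ++ [x], st.2.2)) (a, b, k)
    = (a ++ (splitRec p k xs).1, b ++ (splitRec p k xs).2,
       k - ((splitRec p k xs).1.length : Int)) := by
  induction xs with
  | nil => intro a b k; simp [splitRec]
  | cons x xs ih =>
    intro a b k
    simp only [List.foldl_cons, splitRec]
    by_cases hk : 0 < k ∧ p x = true
    · rw [if_pos hk, if_pos hk, ih (a ++ [x]) b (k - 1)]
      refine Prod.ext (by simp) (Prod.ext (by simp) ?_)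
      simp only [List.length_cons]
      push_cast; omega
    · rw [if_neg hk, if_neg hk, ih a (b ++ [x]) k]
      simp

theorem splitFirst_eq (p : String → Bool) (k : Int) (xs : List String) :
    splitFirst p k xs = splitRec p k xs := by
  simp [splitFirst, splitFirst_fold_aux p xs [] [] k]

theorem splitRec_nonpos (p : String → Bool) (k : Int) (hk : k ≤ 0) (xs : List String) :
    splitRec p k xs = ([], xs) := by
  induction xs with
  | nil => simp [splitRec]
  | cons x xs ih =>
    rw [splitRec, if_neg (fun h => absurd h.1 (by omega)), ih]

theorem splitRec_picked (p : String → Bool) (k : Int) (xs : List String) :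
    ∀ x ∈ (splitRec p k xs).1, p x = true := by
  induction xs generalizing k with
  | nil => simp [splitRec]
  | cons x xs ih =>
    by_cases h : 0 < k ∧ p x = true
    · rw [splitRec, if_pos h]
      intro y hy
      rcases List.mem_cons.mp hy with rfl | hy
      · exact h.2
      · exact ih (k - 1) y hy
    · rw [splitRec, if_neg h]
      exact ih k

theorem splitRec_length_le (p : String → Bool) (k : Int) (xs : List String) :
    ((splitRec p k xs).1.length : Int) ≤ max k 0 := by
  induction xs generalizing k with
  | nil => simp [splitRec]
  | cons x xs ih =>
    by_cases h : 0 < k ∧ p x = true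
    · rw [splitRec, if_pos h]
      have := ih (k - 1)
      simp only [List.length_cons]
      push_cast at *; omega
    · rw [splitRec, if_neg h]
      exact ih k

-- one anchor step of A is a 1-element split
theorem anchor_split (sym : String) (xs : List String) :
    splitRec (fun s => s == sym) 1 xs
      = if sym ∈ xs then ([sym], xs.erase sym) else ([], xs) := by
  induction xs with
  | nil => simp [splitRec]
  | cons x xs ih =>
    by_cases hx : x = sym
    · subst hx
      rw [splitRec, if_pos ⟨by omega, by simp⟩]
      simp [splitRec_nonpos _ 0 (by omega) xs]
    · rw [splitRec, if_neg (fun h => hx (by simpa using h.2)), ih]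
      by_cases hc : sym ∈ xs
      · rw [if_pos hc, if_pos (List.mem_cons_of_mem _ hc),
          List.erase_cons_tail (by simpa using hx)]
      · rw [if_neg hc, if_neg (by simp [hc]; exact Ne.symm hx)]

theorem anchorStepA_eq (sel xs : List String) (sym : String) :
    anchorStepA (sel, xs) sym
      = (sel ++ (splitRec (fun s => s == sym) 1 xs).1,
         (splitRec (fun s => s == sym) 1 xs).2) := by
  rw [anchor_split]
  by_cases hc : sym ∈ xs
  · rw [if_pos hc]
    simp [anchorStepA, hc, PySem.List.remove?_eq_some_erase _ _ hc]
  · rw [if_neg hc]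
    simp [anchorStepA, hc]

theorem remove?_append_not_mem (sym : String) (kept l : List String) (h : sym ∉ kept) :
    PySem.List.remove? (kept ++ sym :: l) sym = some (kept ++ l) := by
  induction kept with
  | nil => simp [PySem.List.remove?_cons_self]
  | cons x xs ih =>
    have hx : x ≠ sym := fun hxe => h (hxe ▸ List.mem_cons_self)
    rw [List.cons_append, PySem.List.remove?_cons_of_ne _ hx,
      ih (fun hm => h (List.mem_cons_of_mem _ hm))]
    rfl

-- A's tier-fill loop over a snapshot = a split of the snapshot
theorem tierFill_split (t minc : Int) (snap : List String) :
    ∀ (kept sel : List String) (cur : Int), (∀ x ∈ kept, tierOf x ≠ t) →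
    tierFillA t minc snap sel (kept ++ snap) cur
      = (sel ++ (splitRec (fun s => tierOf s == t) (minc - cur) snap).1,
         kept ++ (splitRec (fun s => tierOf s == t) (minc - cur) snap).2) := by
  induction snap with
  | nil => intro kept sel cur _; simp [tierFillA, splitRec]
  | cons sym snap ih =>
    intro kept sel cur hkept
    by_cases hcur : cur ≥ minc
    · simp [tierFillA, hcur, splitRec_nonpos _ (minc - cur) (by omega)]
    · by_cases ht : (tierOf sym == t) = true
      · have hsym : sym ∉ kept := fun hm => hkept sym hm (by simpa using ht)
        have hrem := remove?_append_not_mem sym kept snap hsym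
        simp only [tierFillA, if_neg hcur, ht, if_true, hrem, Option.getD_some]
        rw [ih kept (sel ++ [sym]) (cur + 1) hkept]
        simp only [splitRec, ht]
        rw [if_pos (by simp; omega)]
        simp only [List.append_assoc, List.singleton_append]
        have : minc - cur - 1 = minc - (cur + 1) := by omega
        simp [this]
      · have hb : (tierOf sym == t) = false := by simpa using ht
        have heq : kept ++ sym :: snap = (kept ++ [sym]) ++ snap := by simp
        simp only [tierFillA, if_neg hcur, hb, Bool.false_eq_true, if_false, heq]
        rw [ih (kept ++ [sym]) sel cur
          (by intro x hx
              rcases List.mem_append.mp hx with hx | hx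
              · exact hkept x hx
              · simp at hx; subst hx; simpa using ht)]
        simp only [splitRec, hb, Bool.false_eq_true, and_false, if_false,
          List.append_assoc, List.singleton_append]

-- count of a tier none of sel belongs to / all of sel belongs to
theorem countTierA_eq_countP (sel : List String) (t : Int) :
    countTierA sel t = (sel.countP (fun s => tierOf s == t) : Int) := by
  have := PySem.List.foldl_count_if (fun s => tierOf s == t) sel 0
  simpa [countTierA] using this

-- A's rest-fill loop = append a prefix
theorem restFill_take (rem : List String) :
    ∀ sel : List String, sel.length ≤ 10 →
    restFillA rem sel = sel ++ rem.take (10 - sel.length) := by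
  induction rem with
  | nil => intro sel _; simp [restFillA]
  | cons sym rem ih =>
    intro sel hlen
    by_cases h : (sel.length : Int) ≥ TRAINING_SIZE
    · simp only [restFillA]
      rw [if_pos h]
      have h10 : sel.length = 10 := by simp [TRAINING_SIZE] at h; omega
      simp [h10]
    · have hlt : sel.length < 10 := by simp [TRAINING_SIZE] at h; omega
      simp only [restFillA, if_neg h]
      rw [ih (sel ++ [sym]) (by simp; omega)]
      have h10 : 10 - sel.length = (10 - (sel.length + 1)) + 1 := by omega
      simp [h10, List.take_succ_cons]

theorem tierFillA_split' (t minc : Int) (rem sel : List String) (cur : Int) :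
    tierFillA t minc rem sel rem cur
      = (sel ++ (splitRec (fun s => tierOf s == t) (minc - cur) rem).1,
         (splitRec (fun s => tierOf s == t) (minc - cur) rem).2) := by
  simpa using tierFill_split t minc rem [] sel cur (by simp)

theorem countTierA_all (sel : List String) (t : Int)
    (h : ∀ x ∈ sel, (tierOf x == t) = true) :
    countTierA sel t = (sel.length : Int) := by
  rw [countTierA_eq_countP, List.countP_eq_length.mpr h]

theorem countTierA_none (sel : List String) (t : Int)
    (h : ∀ x ∈ sel, (tierOf x == t) = false) :
    countTierA sel t = 0 := by
  rw [countTierA_eq_countP, List.countP_eq_zero.mpr (by simpa [Bool.not_eq_true] using h)]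
  simp

-- ===== VERDICT (by name: the statement is the Claim_ definition above) =====
theorem select_training_subset_py_spec : Claim_equal_select_training_subset_py := by
  intro pipeline _
  show select_training_subset_py pipeline = select_training_subset_py_alt pipeline
  have hso : PySem.List.sorted TRAINING_TIER_MIN.items (fun p => p.1) false
      = [((1:Int),(2:Int)),(2,3)] := by decide
  unfold select_training_subset_py select_training_subset_py_alt
  simp only [hso, List.foldl_cons, List.foldl_nil, splitFirst_eq, anchorStepA_eq,
    List.nil_append, show TRAINING_TIER_MIN.getD 1 0 = 2 from by decide,
    show TRAINING_TIER_MIN.getD 2 0 = 3 from by decide, show TRAINING_SIZE = 10 from rfl]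
  have hBp := splitRec_picked (fun s => s == "BTC") 1 pipeline
  have hBl := splitRec_length_le (fun s => s == "BTC") 1 pipeline
  generalize hB : splitRec (fun s => s == "BTC") 1 pipeline = B at *
  obtain ⟨B1, B2⟩ := B
  have hEp := splitRec_picked (fun s => s == "ETH") 1 B2
  have hEl := splitRec_length_le (fun s => s == "ETH") 1 B2
  generalize hE : splitRec (fun s => s == "ETH") 1 B2 = E at *
  obtain ⟨E1, E2⟩ := E
  dsimp only at *
  -- anchors are all tier 1
  have hanchor1 : ∀ x ∈ B1 ++ E1, (tierOf x == 1) = true := by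
    intro x hx
    rcases List.mem_append.mp hx with hx | hx
    · have : x = "BTC" := by simpa using hBp x hx
      subst this; decide
    · have : x = "ETH" := by simpa using hEp x hx
      subst this; decide
  rw [countTierA_all _ _ hanchor1, tierFillA_split' 1 2]
  dsimp only
  have hPp := splitRec_picked (fun s => tierOf s == 1) (2 - ((B1 ++ E1).length : Int)) E2
  have hPl := splitRec_length_le (fun s => tierOf s == 1) (2 - ((B1 ++ E1).length : Int)) E2
  generalize hP : splitRec (fun s => tierOf s == 1) (2 - ((B1 ++ E1).length : Int)) E2 = P at *
  obtain ⟨P1, P2⟩ := P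
  dsimp only at *
  -- nothing selected so far is tier 2
  have hsel2 : ∀ x ∈ (B1 ++ E1) ++ P1, (tierOf x == 2) = false := by
    intro x hx
    rcases List.mem_append.mp hx with hx | hx
    · rcases List.mem_append.mp hx with hx | hx
      · have : x = "BTC" := by simpa using hBp x hx
        subst this; decide
      · have : x = "ETH" := by simpa using hEp x hx
        subst this; decide
    · have h1 : tierOf x = 1 := by simpa using hPp x hx
      simp [h1]
  rw [countTierA_none _ _ hsel2, tierFillA_split' 2 3]
  dsimp only
  norm_num
  have hQl := splitRec_length_le (fun s => tierOf s == 2) 3 P2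
  generalize hQ : splitRec (fun s => tierOf s == 2) 3 P2 = Q at *
  obtain ⟨Q1, Q2⟩ := Q
  dsimp only at *
  rw [restFill_take Q2 (B1 ++ (E1 ++ (P1 ++ Q1)))
      (by simp only [List.length_append] at *; omega)]
  congr 1
  have hb : (0:Int) ≤ 10 - (((B1.length:Int)) + ((E1.length:Int) + ((P1.length:Int) + (Q1.length:Int)))) := by
    simp only [List.length_append] at *
    omega
  simp only [PySem.List.slice_to Q2 hb]
  rw [show (10 - (((B1.length : Int)) + ((E1.length : Int) + ((P1.length : Int) + (Q1.length : Int))))).toNat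
      = 10 - (B1 ++ (E1 ++ (P1 ++ Q1))).length from by simp only [List.length_append]; omega]
  simp [List.append_assoc]
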